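-- pv_equiv track=rewrite | github.com/cvjena/libmaxdiv | eval.py | pointwiseLabelsToIntervals
-- ===== SOURCE A (Python) =====
-- def pointwiseLabelsToIntervals(labels):
--     """Converts an array of boolean labels for each point in a time series to a list of contiguous intervals."""
--
--     regions = []
--     current_start = None
--
--     for i, lbl in enumerate(labels):
--         # Begin of new interval
--         if (current_start is None) and lbl:
--             current_start = i
--         # End of current interval
--         elif (current_start is not None) and (not lbl):
--             regions.append((current_start, i))
--             current_start = None
--
--     # Terminate trailing interval
--     if current_start is not None:
--         regions.append((current_start, len(labels)))
--
--     return regions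
-- ===== SOURCE B (Python) =====
-- def pointwiseLabelsToIntervals(labels):
--     """Converts an array of boolean labels for each point in a time series to a list of contiguous intervals."""
--     padded = [False] + [bool(lbl) for lbl in labels] + [False]
--     pairs = list(zip(padded, padded[1:]))
--     starts = [i for i, (prev, cur) in enumerate(pairs) if cur and not prev]
--     ends = [i for i, (prev, cur) in enumerate(pairs) if prev and not cur]
--     return list(zip(starts, ends))
-- ===== Notes on version B (the rewrite author's own statement) =====
-- stated objective: idiomatic
-- what changed: Replaces the stateful interval-tracking loop (current_start carried across iterations, trailing interval patched after the loop) by stateless transition detection over a False-padded sequence: collect start indices (False->True edges) and end indices (True->False edges) in two comprehensions and zip them.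
import Mathlib
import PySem

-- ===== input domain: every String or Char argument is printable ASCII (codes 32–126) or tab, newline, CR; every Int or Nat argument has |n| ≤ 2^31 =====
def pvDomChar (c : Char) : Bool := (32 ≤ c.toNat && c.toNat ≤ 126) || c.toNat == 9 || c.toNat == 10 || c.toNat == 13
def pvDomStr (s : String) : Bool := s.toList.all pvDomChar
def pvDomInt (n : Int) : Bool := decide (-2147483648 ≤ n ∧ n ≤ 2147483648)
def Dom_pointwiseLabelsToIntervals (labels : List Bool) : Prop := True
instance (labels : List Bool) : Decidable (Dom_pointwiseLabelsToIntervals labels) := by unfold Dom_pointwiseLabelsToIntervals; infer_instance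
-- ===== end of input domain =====

-- B replaces A's stateful interval-tracking loop by stateless transition detection over a
-- False-padded sequence (collect start/end edge indices, zip them); objective: idiomatic.

-- ===== PORT A =====
-- one loop iteration of A: state = (regions, current_start), item = (i, lbl)
def pvStepA (st : List (Int × Int) × Option Int) (p : Int × Bool) : List (Int × Int) × Option Int :=
  match st, p with
  | (regions, curStart), (i, lbl) =>
    match curStart with
    | none => if lbl then (regions, some i) else (regions, none)
    | some s => if !lbl then (regions ++ [(s, i)], none) else (regions, some s)

def pointwiseLabelsToIntervals (labels : List Bool) : List (Int × Int) :=
  let st := (PySem.List.enumerate labels 0).foldl pvStepA ([], none)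
  match st.2 with
  | some s => st.1 ++ [(s, (labels.length : Int))]
  | none => st.1

-- ===== PORT B =====
def pointwiseLabelsToIntervals_alt (labels : List Bool) : List (Int × Int) :=
  let padded : List Bool := false :: labels ++ [false]
  let pairs := padded.zip (padded.drop 1)
  let starts := ((PySem.List.enumerate pairs 0).filter (fun p => p.2.2 && !p.2.1)).map (·.1)
  let ends := ((PySem.List.enumerate pairs 0).filter (fun p => p.2.1 && !p.2.2)).map (·.1)
  starts.zip ends

-- ===== PRECONDITION & SPEC =====
def Spec_pointwiseLabelsToIntervals (labels : List Bool) (out : List (Int × Int)) : Prop := out = pointwiseLabelsToIntervals_alt labels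
instance (labels : List Bool) (out : List (Int × Int)) : Decidable (Spec_pointwiseLabelsToIntervals labels out) := by unfold Spec_pointwiseLabelsToIntervals; infer_instance

-- ===== CLAIM (what is proved, stated in full; the proofs are below) =====
def Claim_equal_pointwiseLabelsToIntervals : Prop := ∀ (labels : List Bool), Dom_pointwiseLabelsToIntervals labels → Spec_pointwiseLabelsToIntervals labels (pointwiseLabelsToIntervals labels)

-- ===== LEMMAS AND PROOFS =====

-- start indices of runs of `true` in `l`, preceded by `prev`, first index `i` (virtual trailing false)
def pvTransS (prev : Bool) (i : Int) : List Bool → List Int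
  | [] => []
  | b :: l => (if b && !prev then [i] else []) ++ pvTransS b (i + 1) l

-- end indices of those runs (the virtual trailing false ends a run at index i + length)
def pvTransE (prev : Bool) (i : Int) : List Bool → List Int
  | [] => if prev then [i] else []
  | b :: l => (if prev && !b then [i] else []) ++ pvTransE b (i + 1) l

-- B side: the filtered, enumerated pair list computes exactly pvTransS / pvTransE
theorem pvB_starts (l : List Bool) : ∀ (prev : Bool) (i : Int),
    (((PySem.List.enumerate ((prev :: l ++ [false]).zip (l ++ [false])) i).filter
        (fun p => p.2.2 && !p.2.1)).map (·.1)) = pvTransS prev i l := by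
  induction l with
  | nil =>
    intro prev i
    cases prev <;> simp [PySem.List.enumerate_cons, PySem.List.enumerate_nil, pvTransS]
  | cons b rest ih =>
    intro prev i
    rw [show ((prev :: (b :: rest) ++ [false]).zip ((b :: rest) ++ [false]))
        = (prev, b) :: ((b :: rest ++ [false]).zip (rest ++ [false])) from rfl,
      PySem.List.enumerate_cons]
    cases prev <;> cases b <;>
      (simp [pvTransS]; exact ih _ _)

theorem pvB_ends (l : List Bool) : ∀ (prev : Bool) (i : Int),
    (((PySem.List.enumerate ((prev :: l ++ [false]).zip (l ++ [false])) i).filter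
        (fun p => p.2.1 && !p.2.2)).map (·.1)) = pvTransE prev i l := by
  induction l with
  | nil =>
    intro prev i
    cases prev <;> simp [PySem.List.enumerate_cons, PySem.List.enumerate_nil, pvTransE]
  | cons b rest ih =>
    intro prev i
    rw [show ((prev :: (b :: rest) ++ [false]).zip ((b :: rest) ++ [false]))
        = (prev, b) :: ((b :: rest ++ [false]).zip (rest ++ [false])) from rfl,
      PySem.List.enumerate_cons]
    cases prev <;> cases b <;>
      (simp [pvTransE]; exact ih _ _)

-- finalize A's loop state (append the trailing interval, end index n)
def pvPost (st : List (Int × Int) × Option Int) (n : Int) : List (Int × Int) :=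
  match st.2 with
  | some s => st.1 ++ [(s, n)]
  | none => st.1

-- A side: the finalized fold equals the zip of transition starts and ends
theorem pvA_fold (l : List Bool) : ∀ (acc : List (Int × Int)) (i : Int) (cur : Option Int),
    pvPost ((PySem.List.enumerate l i).foldl pvStepA (acc, cur)) (i + l.length) =
      acc ++ List.zip ((match cur with | some s => [s] | none => []) ++ pvTransS cur.isSome i l)
                      (pvTransE cur.isSome i l) := by
  induction l with
  | nil =>
    intro acc i cur
    cases cur <;> simp [PySem.List.enumerate_nil, pvPost, pvTransS, pvTransE]
  | cons b rest ih =>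
    intro acc i cur
    rw [PySem.List.enumerate_cons]
    have hn : i + ((b :: rest).length : Int) = (i + 1) + (rest.length : Int) := by
      simp; ring
    rw [hn]
    cases cur with
    | none =>
      cases b <;>
        simp only [List.foldl_cons, pvStepA, if_true, Option.isSome] <;>
        rw [ih] <;> simp [pvTransS, pvTransE]
    | some s =>
      cases b <;>
        simp only [List.foldl_cons, pvStepA, Bool.not_false, Bool.not_true, if_true,
          Option.isSome] <;>
        rw [ih] <;> simp [pvTransS, pvTransE, List.zip]

-- ===== VERDICT (by name: the statement is the Claim_ definition above) =====
theorem pointwiseLabelsToIntervals_spec : Claim_equal_pointwiseLabelsToIntervals := by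
  intro labels _
  show pointwiseLabelsToIntervals labels = pointwiseLabelsToIntervals_alt labels
  have hA : pointwiseLabelsToIntervals labels
      = pvPost ((PySem.List.enumerate labels 0).foldl pvStepA ([], none)) (labels.length : Int) := rfl
  have hB : pointwiseLabelsToIntervals_alt labels =
      ((((PySem.List.enumerate ((false :: labels ++ [false]).zip (labels ++ [false])) 0).filter
          (fun p => p.2.2 && !p.2.1)).map (·.1)).zip
       (((PySem.List.enumerate ((false :: labels ++ [false]).zip (labels ++ [false])) 0).filter
          (fun p => p.2.1 && !p.2.2)).map (·.1))) := rfl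
  rw [hA, hB, pvB_starts labels false 0, pvB_ends labels false 0]
  have h := pvA_fold labels [] 0 none
  simpa using h
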